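-- pv_equiv track=rewrite | github.com/jacobkrizan/edrive-design-toolkit | training/develop_fea_example_15.py | assign_winding_phases
-- ===== SOURCE A (Python) =====
-- def assign_winding_phases(num_slots, num_poles):
--     """
--     Assign three-phase distributed winding pattern.
--
--     For 48 slots, 8 poles (4 pole pairs):
--     - Pattern repeats every 12 slots (one pole pair)
--     - Each phase shifted by 4 slots (120 electrical degrees)
--     - Creates proper rotating MMF
--
--     Returns:
--         list of tuples: (phase, polarity) for each slot
--         phase: 'A', 'B', or 'C'
--         polarity: +1 (forward current) or -1 (return current)
--     """
--     # Pattern for one pole pair (12 slots)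
--     # Format: (phase, polarity) for each pair of slots
--     pole_pair_pattern = [
--         ('A', +1),  # Slots 0-1
--         ('C', -1),  # Slots 2-3
--         ('B', +1),  # Slots 4-5
--         ('A', -1),  # Slots 6-7
--         ('C', +1),  # Slots 8-9
--         ('B', -1),  # Slots 10-11
--     ]
--
--     winding_assignment = []
--     for slot_idx in range(num_slots):
--         # Position within pole pair (0 to 11)
--         position_in_pole_pair = slot_idx % 12
--         # Which pair of slots (0 to 5)
--         pair_idx = position_in_pole_pair // 2
--
--         phase, polarity = pole_pair_pattern[pair_idx]
--         winding_assignment.append((phase, polarity))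
--
--     return winding_assignment
-- ===== SOURCE B (Python) =====
-- def assign_winding_phases(num_slots, num_poles):
--     """Build the 12-slot pole-pair period once, then tile and slice it."""
--     pole_pair_pattern = [
--         ('A', +1),
--         ('C', -1),
--         ('B', +1),
--         ('A', -1),
--         ('C', +1),
--         ('B', -1),
--     ]
--     period = [entry for entry in pole_pair_pattern for _ in range(2)]
--     return (period * (num_slots // 12 + 1))[:num_slots]
-- ===== Notes on version B (the rewrite author's own statement) =====
-- stated objective: simpler
-- what changed: B expands the 6-entry pole-pair table into its 12-slot period once and then tiles and slices that list, instead of A's per-slot loop with modulo/floor-division indexing.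
import Mathlib
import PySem

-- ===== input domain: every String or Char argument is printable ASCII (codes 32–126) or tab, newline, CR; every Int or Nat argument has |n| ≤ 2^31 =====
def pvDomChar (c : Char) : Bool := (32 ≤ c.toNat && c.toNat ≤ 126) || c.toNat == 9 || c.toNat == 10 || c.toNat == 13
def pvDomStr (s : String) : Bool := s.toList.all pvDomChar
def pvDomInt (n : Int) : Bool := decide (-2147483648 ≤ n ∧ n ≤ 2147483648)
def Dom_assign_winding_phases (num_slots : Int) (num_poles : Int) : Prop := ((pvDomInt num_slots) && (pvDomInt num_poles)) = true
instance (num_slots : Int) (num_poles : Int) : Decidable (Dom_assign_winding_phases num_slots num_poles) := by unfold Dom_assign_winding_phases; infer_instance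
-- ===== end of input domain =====

-- B builds the 12-slot pole-pair period once and tiles+slices it, instead of A's
-- per-slot loop with modulo/floor-division indexing (objective: simpler).

-- ===== PORT A =====
def polePairPattern : List (String × Int) :=
  [("A", 1), ("C", -1), ("B", 1), ("A", -1), ("C", 1), ("B", -1)]

def assign_winding_phases (num_slots : Int) (num_poles : Int) : List (String × Int) :=
  (PySem.List.pyRange 0 num_slots 1).foldl (fun acc slot_idx =>
    let position_in_pole_pair := PySem.Int.mod slot_idx 12
    let pair_idx := PySem.Int.floordiv position_in_pole_pair 2
    -- pattern[pair_idx]: pair_idx is always 0..5, so the default is never used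
    acc ++ [PySem.List.pyGetD polePairPattern pair_idx ("", 0)]) []

-- ===== PORT B =====
def assign_winding_phases_alt (num_slots : Int) (num_poles : Int) : List (String × Int) :=
  let pole_pair_pattern : List (String × Int) :=
    [("A", 1), ("C", -1), ("B", 1), ("A", -1), ("C", 1), ("B", -1)]
  let period := pole_pair_pattern.flatMap (fun entry => [entry, entry])
  -- (period * (num_slots // 12 + 1))[:num_slots]
  PySem.List.slice
    ((List.replicate (PySem.Int.floordiv num_slots 12 + 1).toNat period).flatten)
    none (some num_slots)

-- ===== PRECONDITION & SPEC =====
def Spec_assign_winding_phases (num_slots : Int) (num_poles : Int) (out : List (String × Int)) : Prop := out = assign_winding_phases_alt num_slots num_poles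
instance (num_slots : Int) (num_poles : Int) (out : List (String × Int)) : Decidable (Spec_assign_winding_phases num_slots num_poles out) := by unfold Spec_assign_winding_phases; infer_instance

-- ===== CLAIM (what is proved, stated in full; the proofs are below) =====
def Claim_equal_assign_winding_phases : Prop := ∀ (num_slots : Int) (num_poles : Int), Dom_assign_winding_phases num_slots num_poles → Spec_assign_winding_phases num_slots num_poles (assign_winding_phases num_slots num_poles)

-- ===== LEMMAS AND PROOFS =====

-- the 12-slot period, and the canonical per-slot description both ports equal
def pvPat12 : List (String × Int) :=
  polePairPattern.flatMap (fun entry => [entry, entry])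

def pvCanon (n : Nat) : List (String × Int) :=
  (List.range n).map (fun j => pvPat12.getD (j % 12) ("", 0))

lemma pvCanon_add_twelve (m : Nat) : pvCanon (12 + m) = pvPat12 ++ pvCanon m := by
  unfold pvCanon
  rw [List.range_add, List.map_append, List.map_map]
  have h2 : (List.range m).map ((fun j => pvPat12.getD (j % 12) ("", 0)) ∘ (fun x => 12 + x))
      = (List.range m).map (fun j => pvPat12.getD (j % 12) ("", 0)) := by
    apply List.map_congr_left
    intro j _
    simp [Nat.add_mod_left]
  rw [h2, show (List.range 12).map (fun j => pvPat12.getD (j % 12) ("", 0)) = pvPat12 from by decide]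

lemma pvFlatten_replicate (k : Nat) :
    (List.replicate k pvPat12).flatten = pvCanon (12 * k) := by
  induction k with
  | zero => simp [pvCanon]
  | succ k ih =>
    rw [List.replicate_succ, List.flatten_cons, ih]
    have : 12 * (k + 1) = 12 + 12 * k := by ring
    rw [this, pvCanon_add_twelve]

lemma pvCanon_take (t m : Nat) (h : t ≤ m) : (pvCanon m).take t = pvCanon t := by
  unfold pvCanon
  rw [← List.map_take, List.take_range, Nat.min_eq_left h]

lemma pvA_eq_canon (n : Int) :
    assign_winding_phases n 0 = pvCanon n.toNat := by
  unfold assign_winding_phases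
  rw [PySem.List.foldl_append_singleton_eq_map, PySem.List.pyRange_one]
  simp only [List.nil_append, List.map_map, Int.sub_zero, pvCanon]
  apply List.map_congr_left
  intro j _
  simp only [Function.comp_apply, Int.zero_add]
  rw [show ((12 : Int)) = ((12 : Nat) : Int) by norm_num, PySem.Int.mod_natCast,
      show ((2 : Int)) = ((2 : Nat) : Int) by norm_num, PySem.Int.floordiv_natCast,
      PySem.List.pyGetD_natCast]
  have h12 : j % 12 < 12 := Nat.mod_lt _ (by norm_num)
  set r := j % 12 with hr
  interval_cases r <;> rfl

lemma pvA_eq_canon' (n p : Int) :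
    assign_winding_phases n p = pvCanon n.toNat := pvA_eq_canon n

lemma pvB_eq_canon (n p : Int) :
    assign_winding_phases_alt n p = pvCanon n.toNat := by
  unfold assign_winding_phases_alt
  simp only []
  have hpat : ([("A", (1:Int)), ("C", -1), ("B", 1), ("A", -1), ("C", 1), ("B", -1)].flatMap
      (fun entry => [entry, entry])) = pvPat12 := by decide
  rw [hpat, pvFlatten_replicate]
  by_cases hn : 0 ≤ n
  · rw [PySem.List.slice_to _ hn, pvCanon_take]
    have h1 : PySem.Int.floordiv n 12 = n / 12 :=
      PySem.Int.floordiv_eq_ediv_of_pos (by norm_num)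
    rw [h1]
    have h2 : n < 12 * (n / 12 + 1) := by omega
    have h3 : 0 ≤ n / 12 + 1 := by omega
    omega
  · have hk : PySem.Int.floordiv n 12 + 1 ≤ 0 := by
      have h1 : PySem.Int.floordiv n 12 = n / 12 :=
        PySem.Int.floordiv_eq_ediv_of_pos (by norm_num)
      omega
    have hk0 : (PySem.Int.floordiv n 12 + 1).toNat = 0 := by omega
    rw [hk0]
    have hn0 : n.toNat = 0 := by omega
    rw [hn0]
    simp [pvCanon, PySem.List.slice]

-- ===== VERDICT (by name: the statement is the Claim_ definition above) =====
theorem assign_winding_phases_spec : Claim_equal_assign_winding_phases := by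
  intro n p _
  unfold Spec_assign_winding_phases
  rw [pvA_eq_canon' n p, pvB_eq_canon n p]
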